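-- pv_equiv track=rewrite | github.com/PingMaster99/ProgrammingLanguagesProject1 | inputParser.py | validate_regex
-- ===== SOURCE A (Python) =====
-- def validate_regex(regex):
--     """
--     Validates a regexp
--     :param regex: regular expression
--     :return: if valid / message
--     """
--     valid_characters = ['.', '+', '*', '|', 'a', 'b', '(', ')']
--     invalid_constructions = ['ab', 'ba', '*a', '*b', '+a', '+b', 'bb', 'aa', '..', '||']
--     character_index = 0
--
--     for character in regex:
--         if character not in valid_characters:
--             return False, f'Caracter inválido en la posición {character_index} de la expresión regular\nCaracteres válidos: {valid_characters}'
--         character_index += 1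
--
--     if any(invalid_string in regex for invalid_string in invalid_constructions):
--         return False, 'Construcción inválida detectada, recuerde incluir puntos para la concatenación'
--
--     if regex.count('(') != regex.count(')'):
--         return False, 'La cuenta de paréntesis de apertura no es igual a la cuenta de paréntesis de cerradura'
--
--     return True, ''
-- ===== SOURCE B (Python) =====
-- def validate_regex(regex):
--     """Single fused left-to-right pass: validates each character, tracks the previous
--     character to flag forbidden adjacent pairs by character class, and keeps a running
--     parenthesis balance; errors keep the original precedence order."""
--     prev = None
--     bad_pair = False
--     balance = 0
--     for i, ch in enumerate(regex):
--         if ch not in ".+*|ab()":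
--             return False, ("Caracter inv\u00e1lido en la posici\u00f3n %d de la expresi\u00f3n regular\n"
--                            "Caracteres v\u00e1lidos: ['.', '+', '*', '|', 'a', 'b', '(', ')']" % i)
--         if prev is not None and ((prev in "ab*+" and ch in "ab")
--                                  or (prev == ch and ch in ".|")):
--             bad_pair = True
--         if ch == '(':
--             balance += 1
--         elif ch == ')':
--             balance -= 1
--         prev = ch
--     if bad_pair:
--         return False, 'Construcci\u00f3n inv\u00e1lida detectada, recuerde incluir puntos para la concatenaci\u00f3n'
--     if balance != 0:
--         return False, 'La cuenta de par\u00e9ntesis de apertura no es igual a la cuenta de par\u00e9ntesis de cerradura'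
--     return True, ''
-- ===== Notes on version B (the rewrite author's own statement) =====
-- stated objective: alternative
-- what changed: A's three staged passes (character loop, ten whole-string substring scans, two count() passes) are fused into one left-to-right pass with an accumulator (previous character, forbidden-pair flag via a character-class predicate instead of a pattern table, and a signed parenthesis balance), with errors still reported in A's precedence order.
import Mathlib
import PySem

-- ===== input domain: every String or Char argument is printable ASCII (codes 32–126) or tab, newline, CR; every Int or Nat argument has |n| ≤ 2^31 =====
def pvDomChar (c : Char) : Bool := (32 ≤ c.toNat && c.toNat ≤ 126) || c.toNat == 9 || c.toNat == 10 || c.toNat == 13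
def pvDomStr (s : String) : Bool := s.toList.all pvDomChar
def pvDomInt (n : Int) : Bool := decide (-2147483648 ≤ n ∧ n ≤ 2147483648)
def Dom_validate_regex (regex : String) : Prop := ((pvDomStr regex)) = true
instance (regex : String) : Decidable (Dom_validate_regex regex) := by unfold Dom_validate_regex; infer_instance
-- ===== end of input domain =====

-- B fuses A's three staged passes into one left-to-right pass with an accumulator
-- (previous character, forbidden-pair flag decided by character classes, signed
-- parenthesis balance), preserving A's error precedence order.

-- ===== PORT A =====
def vrValidChars : List Char := ['.', '+', '*', '|', 'a', 'b', '(', ')']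

def vrInvalidConstructions : List String :=
  ["ab", "ba", "*a", "*b", "+a", "+b", "bb", "aa", "..", "||"]

def vrCharMsg (i : Int) : String :=
  "Caracter inválido en la posición " ++ PySem.Int.toStr i ++
    " de la expresión regular\nCaracteres válidos: ['.', '+', '*', '|', 'a', 'b', '(', ')']"

def vrConstructionMsg : String :=
  "Construcción inválida detectada, recuerde incluir puntos para la concatenación"

def vrParenMsg : String :=
  "La cuenta de paréntesis de apertura no es igual a la cuenta de paréntesis de cerradura"

-- A's 'for character in regex' loop with its running character_index
def vrCharLoop : List Char → Int → Option (Bool × String)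
  | [], _ => none
  | c :: rest, i =>
    if c ∈ vrValidChars then vrCharLoop rest (i + 1) else some (false, vrCharMsg i)

def validate_regex (regex : String) : Bool × String :=
  match vrCharLoop regex.toList 0 with
  | some r => r
  | none =>
    if vrInvalidConstructions.any (fun s => PySem.Str.isIn s regex) then
      (false, vrConstructionMsg)
    else if PySem.Str.count regex "(" ≠ PySem.Str.count regex ")" then
      (false, vrParenMsg)
    else (true, "")

-- ===== PORT B =====
-- B's forbidden-pair test: prev in "ab*+" and ch in "ab", or prev == ch and ch in ".|"
def vrPairBad : Option Char → Char → Bool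
  | none, _ => false
  | some x, y =>
    (decide (x ∈ "ab*+".toList) && decide (y ∈ "ab".toList))
      || (x == y && decide (y ∈ ".|".toList))

-- B's single fused loop over enumerate(regex) with state (prev, bad_pair, balance)
def vrFusedLoop : List (Int × Char) → Option Char → Bool → Int → Bool × String
  | [], _, bad, bal =>
    if bad then (false, vrConstructionMsg)
    else if bal ≠ 0 then (false, vrParenMsg)
    else (true, "")
  | (i, c) :: rest, prev, bad, bal =>
    if c ∈ ".+*|ab()".toList then
      vrFusedLoop rest (some c) (bad || vrPairBad prev c)
        (bal + (if c = '(' then 1 else if c = ')' then -1 else 0))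
    else (false, vrCharMsg i)

def validate_regex_alt (regex : String) : Bool × String :=
  vrFusedLoop (PySem.List.enumerate regex.toList 0) none false 0

-- ===== PRECONDITION & SPEC =====
def Spec_validate_regex (regex : String) (out : Bool × String) : Prop := out = validate_regex_alt regex
instance (regex : String) (out : Bool × String) : Decidable (Spec_validate_regex regex out) := by unfold Spec_validate_regex; infer_instance

-- ===== CLAIM (what is proved, stated in full; the proofs are below) =====
def Claim_equal_validate_regex : Prop := ∀ (regex : String), Dom_validate_regex regex → Spec_validate_regex regex (validate_regex regex)

-- ===== LEMMAS AND PROOFS =====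

-- the 10 forbidden pairs as character lists (proof-side characterisation)
def vrForbiddenList : List (List Char) :=
  [['a','b'], ['b','a'], ['*','a'], ['*','b'], ['+','a'],
   ['+','b'], ['b','b'], ['a','a'], ['.','.'], ['|','|']]

-- B's class predicate flags exactly the 10 forbidden pairs
lemma vrPairBad_iff (x y : Char) :
    vrPairBad (some x) y = true ↔ [x, y] ∈ vrForbiddenList := by
  simp only [vrPairBad, vrForbiddenList, Bool.or_eq_true, Bool.and_eq_true,
    decide_eq_true_eq, beq_iff_eq, List.mem_cons, List.not_mem_nil, or_false,
    List.cons.injEq, and_true]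
  have h1 : "ab*+".toList = ['a','b','*','+'] := by decide
  have h2 : "ab".toList = ['a','b'] := by decide
  have h3 : ".|".toList = ['.','|'] := by decide
  rw [h1, h2, h3]
  simp only [List.mem_cons, List.not_mem_nil, or_false]
  constructor
  · rintro (⟨hx | hx | hx | hx, hy | hy⟩ | ⟨rfl, hy | hy⟩) <;> subst_vars <;> decide
  · rintro (⟨rfl, rfl⟩ | ⟨rfl, rfl⟩ | ⟨rfl, rfl⟩ | ⟨rfl, rfl⟩ | ⟨rfl, rfl⟩ |
      ⟨rfl, rfl⟩ | ⟨rfl, rfl⟩ | ⟨rfl, rfl⟩ | ⟨rfl, rfl⟩ | ⟨rfl, rfl⟩) <;> decide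

-- running 'bad-pair seen' flag as a recursive function of (prev, rest)
def vrHasBadPair : Option Char → List Char → Bool
  | _, [] => false
  | p, c :: t => vrPairBad p c || vrHasBadPair (some c) t

def vrBalance : List Char → Int
  | [] => 0
  | c :: t => (if c = '(' then 1 else if c = ')' then -1 else 0) + vrBalance t

-- a 2-character pattern occurs as a substring iff it occurs as an adjacent pair
lemma infix_pair_iff (x y : Char) : ∀ cs : List Char,
    [x, y] <:+: cs ↔ (x, y) ∈ cs.zip (cs.drop 1)
  | [] => by simp
  | [c] => by
    simp only [List.drop_one, List.tail_cons, List.zip_nil_right, List.not_mem_nil, iff_false]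
    rintro ⟨s, t, h⟩
    have := congrArg List.length h
    simp at this
    omega
  | c :: d :: t => by
    rw [List.infix_cons_iff, infix_pair_iff x y (d :: t)]
    simp only [List.drop_one, List.tail_cons, List.zip_cons_cons, List.mem_cons]
    constructor
    · rintro (h | h)
      · rcases List.cons_prefix_cons.mp h with ⟨rfl, h2⟩
        rcases List.cons_prefix_cons.mp h2 with ⟨rfl, _⟩
        exact Or.inl rfl
      · exact Or.inr h
    · rintro (h | h)
      · injection h with h1 h2
        subst h1; subst h2
        exact Or.inl ⟨t, rfl⟩
      · exact Or.inr h

lemma exists_inv_of_pair (x y : Char) (cs : List Char)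
    (hp : (x, y) ∈ cs.zip (cs.drop 1))
    (hmem : String.ofList [x, y] ∈ vrInvalidConstructions) :
    ∃ s ∈ vrInvalidConstructions, s.toList <:+: cs :=
  ⟨String.ofList [x, y], hmem, by simp only [String.toList_ofList]; exact (infix_pair_iff x y cs).mpr hp⟩

lemma hasBadPair_some (x : Char) : ∀ cs : List Char,
    vrHasBadPair (some x) cs = ((x :: cs).zip cs).any (fun p => vrPairBad (some p.1) p.2)
  | [] => rfl
  | c :: t => by
    simp only [vrHasBadPair, List.zip_cons_cons, List.any_cons, hasBadPair_some c t]

lemma hasBadPair_none (cs : List Char) :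
    vrHasBadPair none cs = (cs.zip (cs.drop 1)).any (fun p => vrPairBad (some p.1) p.2) := by
  cases cs with
  | nil => rfl
  | cons c t =>
    simp only [vrHasBadPair, vrPairBad, Bool.false_or, hasBadPair_some c t,
      List.drop_one, List.tail_cons]

-- B's flag agrees with A's 'any forbidden substring' test
lemma hasBadPair_eq_any (cs : List Char) :
    vrHasBadPair none cs = vrInvalidConstructions.any (fun s => PySem.Chars.isIn s.toList cs) := by
  rw [hasBadPair_none, Bool.eq_iff_iff]
  simp only [List.any_eq_true, PySem.Chars.isIn_iff_infix]
  constructor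
  · rintro ⟨⟨px, py⟩, hp, hbad⟩
    have hmem := (vrPairBad_iff px py).mp hbad
    fin_cases hmem <;> exact exists_inv_of_pair _ _ cs hp (by decide)
  · rintro ⟨s, hs, hinf⟩
    fin_cases hs <;>
      exact ⟨_, (infix_pair_iff _ _ cs).mp (by simpa using hinf), (vrPairBad_iff _ _).mpr (by decide)⟩

lemma count_go_single (c : Char) : ∀ (fuel : Nat) (l : List Char) (acc : Nat),
    l.length ≤ fuel → PySem.Chars.count.go [c] fuel l acc = acc + l.count c
  | 0, l, acc => by
    intro h
    have : l = [] := List.eq_nil_of_length_eq_zero (by omega)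
    subst this; rfl
  | fuel + 1, [], acc => by intro _; rfl
  | fuel + 1, h :: t, acc => by
    intro hlen
    simp only [PySem.Chars.count.go, List.isPrefixOf, List.length_cons] at *
    by_cases hc : c = h
    · subst hc
      simp only [BEq.rfl, Bool.true_and, if_pos]
      rw [count_go_single c fuel _ _ (by simpa using Nat.le_of_succ_le_succ hlen)]
      simp
      omega
    · have : (c == h) = false := by simp [hc]
      simp only [this, Bool.false_and, Bool.false_eq_true, if_false]
      rw [count_go_single c fuel t acc (Nat.le_of_succ_le_succ hlen)]
      simp [Ne.symm hc]

lemma count_single (cs : List Char) (c : Char) :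
    PySem.Chars.count cs [c] = cs.count c := by
  simp only [PySem.Chars.count, List.isEmpty_cons, Bool.false_eq_true, if_false]
  simpa using count_go_single c cs.length cs 0 (le_refl _)

-- B's running balance equals the difference of A's two counts
lemma balance_eq_counts : ∀ cs : List Char,
    vrBalance cs = (cs.count '(' : Int) - (cs.count ')' : Int)
  | [] => by simp [vrBalance]
  | c :: t => by
    simp only [vrBalance, List.count_cons, balance_eq_counts t]
    by_cases h1 : c = '(' <;> by_cases h2 : c = ')' <;> simp_all <;> omega

lemma valid_mem (c : Char) : (c ∈ ".+*|ab()".toList) ↔ c ∈ vrValidChars := by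
  have h : ".+*|ab()".toList = ['.', '+', '*', '|', 'a', 'b', '(', ')'] := by decide
  rw [h, vrValidChars]

-- the fused-loop invariant: B's single pass equals A's staged result
lemma fusedLoop_eq (cs : List Char) : ∀ (i bal : Int) (prev : Option Char) (bad : Bool),
    vrFusedLoop (PySem.List.enumerate cs i) prev bad bal =
      match vrCharLoop cs i with
      | some r => r
      | none =>
        if bad || vrHasBadPair prev cs then (false, vrConstructionMsg)
        else if bal + vrBalance cs ≠ 0 then (false, vrParenMsg)
        else (true, "") := by
  induction cs with
  | nil =>
    intro i bal prev bad
    simp [PySem.List.enumerate, vrFusedLoop, vrCharLoop, vrHasBadPair, vrBalance]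
  | cons c t ih =>
    intro i bal prev bad
    rw [PySem.List.enumerate_cons]
    simp only [vrFusedLoop, vrCharLoop, vrHasBadPair, vrBalance]
    by_cases hc : c ∈ vrValidChars
    · rw [if_pos ((valid_mem c).mpr hc), if_pos hc, ih]
      cases vrCharLoop t (i + 1) with
      | some r => rfl
      | none =>
        simp only [Bool.or_assoc]
        have : bal + (if c = '(' then 1 else if c = ')' then -1 else 0) + vrBalance t
            = bal + ((if c = '(' then 1 else if c = ')' then -1 else 0) + vrBalance t) := by ring
        rw [this]
        rfl
    · rw [if_neg (fun h => hc ((valid_mem c).mp h)), if_neg hc]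

-- ===== VERDICT (by name: the statement is the Claim_ definition above) =====
theorem validate_regex_spec : Claim_equal_validate_regex := by
  intro regex _
  unfold Spec_validate_regex validate_regex validate_regex_alt
  rw [fusedLoop_eq]
  cases vrCharLoop regex.toList 0 with
  | some r => rfl
  | none =>
    have hany : (vrInvalidConstructions.any (fun s => PySem.Str.isIn s regex))
        = vrHasBadPair none regex.toList := by
      rw [hasBadPair_eq_any]
      simp [PySem.Str.isIn]
    have hcnt : (PySem.Str.count regex "(" ≠ PySem.Str.count regex ")")
        ↔ ((0 : Int) + vrBalance regex.toList ≠ 0) := by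
      rw [balance_eq_counts]
      simp only [PySem.Str.count_eq]
      have e1 : "(".toList = ['('] := by decide
      have e2 : ")".toList = [')'] := by decide
      rw [e1, e2, count_single, count_single]
      omega
    simp only [Bool.false_or]
    rw [hany]
    exact if_congr Iff.rfl rfl (if_congr hcnt rfl rfl)
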